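-- pv_equiv track=rewrite | github.com/ndjordjevic/oracle-rag | scripts/print_pdf_page.py | reflow_text
-- ===== SOURCE A (Python) =====
-- import textwrap
--
-- def reflow_text(text: str, width: int = 72) -> str:
--     """Merge scattered PDF lines into paragraphs and wrap to width."""
--     # Strip and drop empty lines; collapse runs of whitespace (layout PDFs have huge gaps)
--     lines = [" ".join(ln.split()) for ln in text.splitlines() if ln.strip()]
--     if not lines:
--         return text.strip()
--
--     paragraphs: list[list[str]] = []
--     current: list[str] = []
--
--     for line in lines:
--         if not current:
--             current.append(line)
--             continue
--         prev = current[-1]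
--         # Start new paragraph when previous looks like end of sentence and this like a new one
--         if (
--             prev.endswith((".", "!", "?"))
--             and len(prev) > 40
--             and line
--             and line[0].isupper()
--         ):
--             paragraphs.append(current)
--             current = [line]
--         else:
--             current.append(line)
--
--     if current:
--         paragraphs.append(current)
--
--     return "\n\n".join(
--         textwrap.fill(" ".join(p), width=width) for p in paragraphs
--     )
-- ===== SOURCE B (Python) =====
-- import textwrap
--
-- def reflow_text(text: str, width: int = 72) -> str:
--     """Merge scattered PDF lines into paragraphs and wrap to width."""
--     lines = [" ".join(ln.split()) for ln in text.splitlines() if ln.strip()]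
--     if not lines:
--         return text.strip()
--
--     # Pass 1: indices at which a new paragraph starts.
--     breaks = [
--         i + 1
--         for i, (prev, cur) in enumerate(zip(lines, lines[1:]))
--         if prev.endswith((".", "!", "?")) and len(prev) > 40 and cur[0].isupper()
--     ]
--     # Pass 2: slice the lines at those boundaries.
--     bounds = [0] + breaks + [len(lines)]
--     paragraphs = [lines[a:b] for a, b in zip(bounds, bounds[1:])]
--
--     return "\n\n".join(
--         textwrap.fill(" ".join(p), width=width) for p in paragraphs
--     )
-- ===== Notes on version B (the rewrite author's own statement) =====
-- stated objective: alternative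
-- what changed: A groups lines into paragraphs with a single accumulating fold (paragraphs + current buffer); B instead makes one pass over adjacent line pairs to collect paragraph-break indices and a second pass slicing the line list at those indices, with identical line cleaning and textwrap.fill wrapping.
-- outside the precondition, e.g. on reflow_text('hello', 0): A raises ValueError, B raises ValueError
import Mathlib
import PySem

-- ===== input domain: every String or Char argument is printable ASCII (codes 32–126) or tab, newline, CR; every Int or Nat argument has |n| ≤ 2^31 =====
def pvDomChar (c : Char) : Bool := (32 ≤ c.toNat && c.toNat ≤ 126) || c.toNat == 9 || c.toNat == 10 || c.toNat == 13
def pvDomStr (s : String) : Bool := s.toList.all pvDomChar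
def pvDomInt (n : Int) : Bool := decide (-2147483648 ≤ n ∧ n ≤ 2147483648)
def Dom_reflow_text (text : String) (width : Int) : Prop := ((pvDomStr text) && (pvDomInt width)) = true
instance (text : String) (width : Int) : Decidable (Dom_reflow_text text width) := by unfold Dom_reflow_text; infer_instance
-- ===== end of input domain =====

-- B keeps A's line cleaning but replaces the accumulating paragraph fold by two passes (collect
-- break indices over adjacent line pairs, then slice); its textwrap.fill call is ported as its own
-- wrap implementation (find-based word scan, chunk-length recursion, fit count + take/drop,
-- cons-building loop), proved equal to A's fuel/accumulator transcription (objective: alternative).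

-- ===== PORT A =====

-- lines = [" ".join(ln.split()) for ln in text.splitlines() if ln.strip()]
def pvLines (text : String) : List String :=
  ((PySem.Str.splitlines text).filter (fun ln => PySem.Str.strip ln != "")).map
    (fun ln => PySem.Str.join " " (PySem.Str.split₀ ln))

-- character classes of textwrap's wordsep_re, on ASCII
def pvIsWS (c : Char) : Bool :=
  c == ' ' || c == '\t' || c == '\n' || c == '\x0b' || c == '\x0c' || c == '\r'
def pvIsW (c : Char) : Bool := PySem.Chars.isalnum c || c == '_'
def pvIsLt (c : Char) : Bool := pvIsW c && !(PySem.Chars.isdigit c)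
def pvIsWP (c : Char) : Bool :=
  pvIsW c || c == '!' || c == '"' || c == '\'' || c == '&' || c == '.' || c == ',' || c == '?'
def pvLt? (s : List Char) (k : Nat) : Bool := (s[k]?.map pvIsLt).getD false
def pvHyRun (s : List Char) (j : Nat) : Nat := ((s.drop j).takeWhile (· == '-')).length
-- at position j: a run of >= 2 hyphens followed by a \w character ( `-{2,}(?=\w)` resp. `(?=-{2,}\w)` )
def pvEmdashAt (s : List Char) (j : Nat) : Bool :=
  decide (2 ≤ pvHyRun s j) && ((s[j + pvHyRun s j]?.map pvIsW).getD false)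

-- textwrap._handle_long_word (break_long_words=True, break_on_hyphens=True)
def pvHandleLong (w : Int) (curLen : Nat) (r : List Char) : List Char × List Char :=
  let spaceLeft : Int := if w < 1 then 1 else w - curLen
  let e : Nat :=
    if spaceLeft < (r.length : Int) then
      let hy : Int := PySem.Chars.rfindFrom r ['-'] 0 (some spaceLeft)
      if 0 < hy && (r.take hy.toNat).any (fun c => c != '-') then hy.toNat + 1 else spaceLeft.toNat
    else spaceLeft.toNat
  (r.take e, r.drop e)

-- A's literal break condition also tests the truthiness of `line` (Source A: `and line and line[0].isupper()`)
def pvBreakCondA (prev line : String) : Bool :=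
  (PySem.Str.endswith prev "." || PySem.Str.endswith prev "!" || PySem.Str.endswith prev "?")
  && decide (40 < PySem.Str.len prev)
  && decide (line ≠ "")
  && ((PySem.Str.pyGet? line 0).map PySem.Chars.isupper).getD false

-- lazy scan of textwrap.wordsep_re's word alternative: first j ending the word chunk that starts before j
-- (fuel-driven; fuel s.length + 1 always suffices since j increases each step)
def pvWordEnd (s : List Char) : Nat → Nat → Nat
  | 0, j => j
  | fuel+1, j =>
    if j < s.length then
      -- hyphenated-word break: consumed '-', lookbehind lt lt '-' or lt '-' lt '-', lookahead lt -? lt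
      if (s[j]? == some '-')
         && ((decide (2 ≤ j) && pvLt? s (j-2) && pvLt? s (j-1))
             || (decide (3 ≤ j) && pvLt? s (j-3) && (s[j-2]? == some '-') && pvLt? s (j-1)))
         && pvLt? s (j+1)
         && (pvLt? s (j+2) || ((s[j+2]? == some '-') && pvLt? s (j+3)))
      then j+1
      -- end of word: whitespace (or, in the else of the outer if, end of string)
      else if (s[j]?.map pvIsWS).getD false then j
      -- em-dash ahead after word punctuation
      else if ((s[j-1]?.map pvIsWP).getD false) && pvEmdashAt s j then j
      else pvWordEnd s fuel (j+1)
    else j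

-- chunks = [c for c in wordsep_re.split(text) if c]  (fuel s.length + 1 suffices: i advances every step)
def pvTokenize (s : List Char) : Nat → Nat → List (List Char)
  | 0, _ => []
  | fuel+1, i =>
    if i < s.length then
      let c := (s[i]?).getD ' '
      if pvIsWS c then
        let k := i + ((s.drop i).takeWhile pvIsWS).length
        ((s.drop i).take (k - i)) :: pvTokenize s fuel k
      else if (c == '-') && decide (1 ≤ i) && ((s[i-1]?.map pvIsWP).getD false) && pvEmdashAt s i then
        let k := i + pvHyRun s i
        ((s.drop i).take (k - i)) :: pvTokenize s fuel k
      else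
        let e := pvWordEnd s (s.length + 1) (i+1)
        ((s.drop i).take (e - i)) :: pvTokenize s fuel e
    else []

-- inner `while chunks: ... if cur_len + l <= width: cur_line.append(chunks.pop()) else break`
def pvTakeFit (w : Int) : Nat → List (List Char) → (List (List Char) × List (List Char))
  | _, [] => ([], [])
  | curLen, c :: cs =>
    if ((curLen + c.length : Nat) : Int) ≤ w then
      let tr := pvTakeFit w (curLen + c.length) cs
      (c :: tr.1, tr.2)
    else ([], c :: cs)

-- outer loop of textwrap._wrap_chunks (drop_whitespace=True, no indents, max_lines=None);
-- fuel (total chunk length + chunk count + 1) suffices: each iteration deletes a chunk,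
-- pops at least one chunk, or shortens the head chunk
def pvWrapLoop (w : Int) : Nat → List (List Char) → List (List Char) → List (List Char)
  | 0, _, acc => acc
  | fuel+1, chunks, acc =>
    match chunks with
    | [] => acc
    | c :: cs =>
      let chunks1 := if (PySem.Chars.strip c).isEmpty && !acc.isEmpty then cs else c :: cs
      let cr := pvTakeFit w 0 chunks1
      let cr1 : List (List Char) × List (List Char) :=
        match cr.2 with
        | [] => (cr.1, [])
        | r :: rs =>
          if w < (r.length : Int) then
            let pq := pvHandleLong w ((cr.1.map List.length).sum) r
            (cr.1 ++ [pq.1], pq.2 :: rs)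
          else (cr.1, r :: rs)
      let cur2 := match cr1.1.getLast? with
        | some lastc => if (PySem.Chars.strip lastc).isEmpty then cr1.1.dropLast else cr1.1
        | none => cr1.1
      let acc1 := if cur2.isEmpty then acc else acc ++ [cur2.flatten]
      pvWrapLoop w fuel cr1.2 acc1

-- textwrap.fill(p, width=width)
def pvFill (p : String) (width : Int) : String :=
  let cs := p.toList
  let chunks := pvTokenize cs (cs.length + 1) 0
  String.ofList (PySem.Chars.join ['\n'] (pvWrapLoop width ((chunks.map List.length).sum + chunks.length + 1) chunks []))

-- A's loop body: state (paragraphs, current)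
def pvStepA (st : List (List String) × List String) (line : String) :
    List (List String) × List String :=
  if st.2.isEmpty then (st.1, st.2 ++ [line])
  else
    let prev := (PySem.List.pyGet? st.2 (-1)).getD ""
    if pvBreakCondA prev line then (st.1 ++ [st.2], [line])
    else (st.1, st.2 ++ [line])

def reflow_text (text : String) (width : Int) : String :=
  let lines := pvLines text
  if lines.isEmpty then PySem.Str.strip text
  else
    let st := lines.foldl pvStepA ([], [])
    let paragraphs := if !st.2.isEmpty then st.1 ++ [st.2] else st.1
    PySem.Str.join "\n\n" (paragraphs.map (fun p => pvFill (PySem.Str.join " " p) width))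

-- ===== PORT B =====
-- B's transcription of textwrap.fill: its own character classes (list membership), recursive run
-- counters, a findSome?-based word scan, a chunk-length tokenizer by well-founded recursion, a
-- fit-count + take/drop line builder, and a cons-building wrap loop with a Bool flag.

-- lines = [" ".join(ln.split()) for ln in text.splitlines() if ln.strip()]  (one filterMap pass)
def pvLinesB (text : String) : List String :=
  (PySem.Str.splitlines text).filterMap (fun raw =>
    if PySem.Str.strip raw == "" then none
    else some (PySem.Str.join " " (PySem.Str.split₀ raw)))

-- prev.endswith((".", "!", "?")) and len(prev) > 40 and cur[0].isupper()  (empty cur gives False)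
def pvBreakCondB (prev cur : String) : Bool :=
  [".", "!", "?"].any (fun suf => PySem.Str.endswith prev suf)
  && decide (40 < PySem.Str.len prev)
  && (match cur.toList with
      | [] => false
      | ch :: _ => PySem.Chars.isupper ch)

-- character classes of textwrap's wordsep_re, read off at a position
def pvWsB (ch : Char) : Bool := [' ', '\t', '\n', '\x0b', '\x0c', '\r'].contains ch
def pvWsAt (t : List Char) (k : Nat) : Bool :=
  match t[k]? with
  | none => false
  | some ch => pvWsB ch
def pvLetterAt (t : List Char) (k : Nat) : Bool :=
  match t[k]? with
  | none => false
  | some ch => (PySem.Chars.isalnum ch || ch == '_') && !(PySem.Chars.isdigit ch)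
def pvWordCharAt (t : List Char) (k : Nat) : Bool :=
  match t[k]? with
  | none => false
  | some ch => PySem.Chars.isalnum ch || ch == '_'
def pvPunctAt (t : List Char) (k : Nat) : Bool :=
  match t[k]? with
  | none => false
  | some ch => PySem.Chars.isalnum ch || ['_', '!', '"', '\'', '&', '.', ',', '?'].contains ch

-- run lengths counted by recursion on the position
def pvDashRun (t : List Char) (k : Nat) : Nat :=
  if h : k < t.length then (if t[k] == '-' then pvDashRun t (k+1) + 1 else 0) else 0
termination_by t.length - k
def pvWsRun (t : List Char) (k : Nat) : Nat :=
  if h : k < t.length then (if pvWsB t[k] then pvWsRun t (k+1) + 1 else 0) else 0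
termination_by t.length - k

-- at position k: a run of >= 2 dashes followed by a word character
def pvEmdashB (t : List Char) (k : Nat) : Bool :=
  decide (2 ≤ pvDashRun t k) && pvWordCharAt t (k + pvDashRun t k)

-- where the regex word scan stops: `some e` = the chunk ends at e, `none` = keep scanning
def pvStopB (t : List Char) (k : Nat) : Option Nat :=
  if (t[k]? == some '-')
     && (pvLetterAt t (k-1)
         && (if t[k-2]? == some '-' then decide (3 ≤ k) && pvLetterAt t (k-3)
             else decide (2 ≤ k) && pvLetterAt t (k-2)))
     && pvLetterAt t (k+1)
     && (pvLetterAt t (k+2) || ((t[k+2]? == some '-') && pvLetterAt t (k+3)))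
  then some (k+1)
  else if pvWsAt t k || (pvPunctAt t (k-1) && pvEmdashB t k)
  then some k
  else none

def pvWordEndB (t : List Char) (k : Nat) : Nat :=
  ((List.range' k (t.length - k)).findSome? (pvStopB t)).getD t.length

-- length of the chunk beginning at position k (k < t.length)
def pvChunkLen (t : List Char) (k : Nat) : Nat :=
  match t[k]? with
  | none => 1
  | some ch =>
    if pvWsB ch then pvWsRun t k
    else if (ch == '-') && decide (1 ≤ k) && pvPunctAt t (k-1) && pvEmdashB t k then pvDashRun t k
    else pvWordEndB t (k+1) - k

-- the word scan never stops before its start (termination fact for pvTokensB)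
theorem pvWordEndB_ge (t : List Char) (k : Nat) (h : k ≤ t.length) : k ≤ pvWordEndB t k := by
  unfold pvWordEndB
  rcases hf : (List.range' k (t.length - k)).findSome? (pvStopB t) with _ | e
  · simpa using h
  · obtain ⟨a, ha, hsa⟩ := List.exists_of_findSome?_eq_some hf
    have hja : k ≤ a := by
      have := List.mem_range'_1.mp ha
      omega
    unfold pvStopB at hsa
    split_ifs at hsa <;> simp_all <;> omega

theorem pvChunkLen_pos (t : List Char) (k : Nat) (h : k < t.length) : 0 < pvChunkLen t k := by
  unfold pvChunkLen
  rcases hg : t[k]? with _ | ch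
  · exact Nat.one_pos
  · dsimp only
    split_ifs with h1 h2
    · have hk : k < t.length := by
        by_contra hk
        rw [List.getElem?_eq_none (by omega)] at hg
        exact absurd hg (by simp)
      have hch : t[k] = ch := by
        rw [List.getElem?_eq_getElem hk] at hg
        exact (Option.some.injEq _ _).mp hg
      rw [pvWsRun, dif_pos hk, hch, if_pos h1]
      omega
    · have h2' := h2
      simp only [Bool.and_eq_true] at h2'
      have hem : pvEmdashB t k = true := h2'.2
      unfold pvEmdashB at hem
      simp only [Bool.and_eq_true, decide_eq_true_eq] at hem
      omega
    · have := pvWordEndB_ge t (k+1) (by omega)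
      omega

def pvTokensB (t : List Char) (k : Nat) : List (List Char) :=
  if h : k < t.length then
    (t.drop k).take (pvChunkLen t k) :: pvTokensB t (k + pvChunkLen t k)
  else []
termination_by t.length - k
decreasing_by have := pvChunkLen_pos t k h; omega

-- how many leading chunks fit within width, starting from `used` cells already taken
def pvFitLen (width : Int) (used : Nat) : List (List Char) → Nat
  | [] => 0
  | word :: more =>
    if ((used + word.length : Nat) : Int) ≤ width then pvFitLen width (used + word.length) more + 1
    else 0

def pvSumLen : List (List Char) → Nat
  | [] => 0
  | word :: more => word.length + pvSumLen more

-- textwrap._handle_long_word, taking the fitting branch first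
def pvSplitLongB (width : Int) (used : Nat) (word : List Char) : List Char × List Char :=
  let room : Int := if width < 1 then 1 else width - used
  let cut : Nat :=
    if (word.length : Int) ≤ room then room.toNat
    else
      let hy : Int := PySem.Chars.rfindFrom word ['-'] 0 (some room)
      if 0 < hy && (word.take hy.toNat).any (fun ch => ch != '-') then hy.toNat + 1
      else room.toNat
  (word.take cut, word.drop cut)

-- the wrap loop, building the list of lines front-to-back; `started` = some line already emitted
def pvWrapB (width : Int) : Nat → Bool → List (List Char) → List (List Char)
  | 0, _, _ => []
  | gas+1, started, queue =>
    match queue with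
    | [] => []
    | word :: more =>
      let queue1 := if (PySem.Chars.strip word).isEmpty && started then more else word :: more
      let fit := pvFitLen width 0 queue1
      let line := queue1.take fit
      let step : List (List Char) × List (List Char) :=
        match queue1.drop fit with
        | [] => (line, [])
        | big :: later =>
          if width < (big.length : Int) then
            let halves := pvSplitLongB width (pvSumLen line) big
            (line ++ [halves.1], halves.2 :: later)
          else (line, big :: later)
      let line2 :=
        if ((step.1.getLast?.map (fun tail => (PySem.Chars.strip tail).isEmpty)).getD false)
        then step.1.dropLast else step.1
      if line2.isEmpty then pvWrapB width gas started step.2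
      else line2.flatten :: pvWrapB width gas true step.2

def pvFillB (para : String) (width : Int) : String :=
  let t := para.toList
  let pieces := pvTokensB t 0
  String.ofList (PySem.Chars.join ['\n'] (pvWrapB width (pvSumLen pieces + pieces.length + 1) false pieces))

def reflow_text_alt (text : String) (width : Int) : String :=
  let lns := pvLinesB text
  if lns.isEmpty then PySem.Str.strip text
  else
    let brks : List Int :=
      (PySem.List.enumerate (lns.zip (PySem.List.slice lns (some 1) none)) 0).filterMap
        (fun pair => if pvBreakCondB pair.2.1 pair.2.2 then some (pair.1 + 1) else none)
    let bnds : List Int := 0 :: brks ++ [(lns.length : Int)]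
    let paras := (bnds.zip (PySem.List.slice bnds (some 1) none)).map
      (fun seg => PySem.List.slice lns (some seg.1) (some seg.2))
    PySem.Str.join "\n\n" (paras.map (fun para => pvFillB (PySem.Str.join " " para) width))

-- ===== PRECONDITION & SPEC =====
-- Pre_ excludes width ≤ 0 together with text that still contains a nonempty line: there
-- textwrap.fill is reached and BOTH Pythons raise a ValueError.
def Pre_reflow_text (text : String) (width : Int) : Prop :=
  1 ≤ width ∨ PySem.Str.strip text = ""
instance (text : String) (width : Int) : Decidable (Pre_reflow_text text width) := by
  unfold Pre_reflow_text; infer_instance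
def pvWitness_reflow_text : String × Int := ("First line of a pdf.\nsecond  line", 10)

def Spec_reflow_text (text : String) (width : Int) (out : String) : Prop := out = reflow_text_alt text width
instance (text : String) (width : Int) (out : String) : Decidable (Spec_reflow_text text width out) := by
  unfold Spec_reflow_text; infer_instance

-- ===== CLAIM (what is proved, stated in full; the proofs are below) =====
def Claim_equal_reflow_text : Prop := ∀ (text : String) (width : Int), Dom_reflow_text text width → Pre_reflow_text text width → Spec_reflow_text text width (reflow_text text width)

-- ===== LEMMAS AND PROOFS =====

-- the break condition both sides reduce to (proof-side normal form)
def pvBreakCond (prev line : String) : Bool :=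
  (PySem.Str.endswith prev "." || PySem.Str.endswith prev "!" || PySem.Str.endswith prev "?")
  && decide (40 < PySem.Str.len prev)
  && ((PySem.Str.pyGet? line 0).map PySem.Chars.isupper).getD false


-- ---- bridges: B's helpers written in A's vocabulary ----

theorem pvWsB_eq (ch : Char) : pvWsB ch = pvIsWS ch := by
  unfold pvWsB pvIsWS
  simp only [List.contains_cons, List.contains_nil, Bool.or_false, Bool.or_assoc]

theorem pvWsAt_eq (t : List Char) (k : Nat) : pvWsAt t k = ((t[k]?.map pvIsWS).getD false) := by
  unfold pvWsAt
  rcases t[k]? with _ | ch <;> simp [pvWsB_eq]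

theorem pvLetterAt_eq (t : List Char) (k : Nat) : pvLetterAt t k = pvLt? t k := by
  unfold pvLetterAt pvLt?
  rcases t[k]? with _ | ch <;> simp [pvIsLt, pvIsW]

theorem pvWordCharAt_eq (t : List Char) (k : Nat) :
    pvWordCharAt t k = ((t[k]?.map pvIsW).getD false) := by
  unfold pvWordCharAt
  rcases t[k]? with _ | ch <;> simp [pvIsW]

theorem pvPunctAt_eq (t : List Char) (k : Nat) :
    pvPunctAt t k = ((t[k]?.map pvIsWP).getD false) := by
  unfold pvPunctAt
  rcases t[k]? with _ | ch
  · simp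
  · simp only [pvIsWP, pvIsW, List.contains_cons, List.contains_nil, Bool.or_false, Bool.or_assoc,
      Option.map_some, Option.getD_some]

theorem pvDashRun_eq_aux (t : List Char) : ∀ (n k : Nat), t.length - k ≤ n →
    pvDashRun t k = pvHyRun t k := by
  intro n
  induction n with
  | zero =>
    intro k h
    rw [pvDashRun, dif_neg (by omega)]
    unfold pvHyRun
    rw [List.drop_eq_nil_of_le (by omega)]
    rfl
  | succ n ih =>
    intro k h
    by_cases hk : k < t.length
    · have hd : t.drop k = t[k] :: t.drop (k+1) := List.drop_eq_getElem_cons hk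
      rw [pvDashRun, dif_pos hk]
      unfold pvHyRun
      rw [hd, List.takeWhile_cons]
      by_cases hc : t[k] == '-'
      · rw [if_pos hc]
        simp only [hc, if_true, List.length_cons]
        rw [ih (k+1) (by omega)]
        rfl
      · rw [if_neg hc]
        simp only [hc, Bool.false_eq_true, if_false, List.length_nil]
    · rw [pvDashRun, dif_neg hk]
      unfold pvHyRun
      rw [List.drop_eq_nil_of_le (by omega)]
      rfl

theorem pvDashRun_eq (t : List Char) (k : Nat) : pvDashRun t k = pvHyRun t k :=
  pvDashRun_eq_aux t t.length k (by omega)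

theorem pvWsRun_eq_aux (t : List Char) : ∀ (n k : Nat), t.length - k ≤ n →
    pvWsRun t k = ((t.drop k).takeWhile pvIsWS).length := by
  intro n
  induction n with
  | zero =>
    intro k h
    rw [pvWsRun, dif_neg (by omega), List.drop_eq_nil_of_le (by omega)]
    rfl
  | succ n ih =>
    intro k h
    by_cases hk : k < t.length
    · have hd : t.drop k = t[k] :: t.drop (k+1) := List.drop_eq_getElem_cons hk
      rw [pvWsRun, dif_pos hk, hd, List.takeWhile_cons, pvWsB_eq]
      by_cases hc : pvIsWS t[k]
      · simp only [hc, if_true, List.length_cons]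
        rw [ih (k+1) (by omega)]
      · simp only [hc, Bool.false_eq_true, if_false, List.length_nil]
    · rw [pvWsRun, dif_neg hk, List.drop_eq_nil_of_le (by omega)]
      rfl

theorem pvWsRun_eq (t : List Char) (k : Nat) :
    pvWsRun t k = ((t.drop k).takeWhile pvIsWS).length :=
  pvWsRun_eq_aux t t.length k (by omega)

theorem pvEmdashB_eq (t : List Char) (k : Nat) : pvEmdashB t k = pvEmdashAt t k := by
  unfold pvEmdashB pvEmdashAt
  rw [pvDashRun_eq, pvWordCharAt_eq]

theorem pvSplitLongB_eq (w : Int) (n : Nat) (r : List Char) :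
    pvSplitLongB w n r = pvHandleLong w n r := by
  unfold pvSplitLongB pvHandleLong
  dsimp only
  by_cases h : (if w < 1 then (1 : Int) else w - n) < (r.length : Int)
  · rw [if_neg (by omega), if_pos h]
  · rw [if_pos (by omega), if_neg h]

theorem pvLinesB_eq (text : String) : pvLinesB text = pvLines text := by
  unfold pvLinesB pvLines
  induction PySem.Str.splitlines text with
  | nil => rfl
  | cons ln rest ih =>
    rw [List.filterMap_cons, List.filter_cons]
    by_cases h : PySem.Str.strip ln = ""
    · simp only [h]
      rw [ih]
      rfl
    · have h1 : (PySem.Str.strip ln == "") = false := by simpa using h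
      have h2 : (PySem.Str.strip ln != "") = true := by simpa using h
      simp only [h1, h2, if_true, List.map_cons]
      rw [ih]
      rfl

theorem pvBreakCondB_eq (prev cur : String) : pvBreakCondB prev cur = pvBreakCond prev cur := by
  unfold pvBreakCondB pvBreakCond
  rcases hc : cur.toList with _ | ⟨ch, rest⟩ <;>
    simp [PySem.Str.pyGet?, PySem.List.pyGet?, PySem.List.pyIdx?, hc, Bool.or_assoc]

-- ---- B's fill equals A's fill ----

theorem pvLt?_dash (s : List Char) (k : Nat) (h : s[k]? = some '-') : pvLt? s k = false := by
  simp only [pvLt?, h, Option.map_some, Option.getD_some]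
  decide

-- A's lookbehind disjunction in if-form (the two disjuncts are exclusive on s[j-2])
theorem pvHyb_eq (s : List Char) (j : Nat) :
    ((decide (2 ≤ j) && pvLt? s (j-2) && pvLt? s (j-1))
      || (decide (3 ≤ j) && pvLt? s (j-3) && (s[j-2]? == some '-') && pvLt? s (j-1)))
    = (pvLt? s (j-1)
        && (if s[j-2]? == some '-' then decide (3 ≤ j) && pvLt? s (j-3)
            else decide (2 ≤ j) && pvLt? s (j-2))) := by
  by_cases h : s[j-2]? = some '-'
  · have hlt := pvLt?_dash s (j-2) h
    cases hb1 : pvLt? s (j-1) <;> cases hb2 : pvLt? s (j-3) <;> by_cases h3 : (3:Nat) ≤ j <;>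
      simp [h, hlt, h3]
  · have h' : (s[j-2]? == some '-') = false := by simpa using h
    cases hb1 : pvLt? s (j-1) <;> cases hb2 : pvLt? s (j-2) <;> by_cases h2 : (2:Nat) ≤ j <;>
      simp [h', h2]

theorem pvWordEnd_eq (s : List Char) : ∀ (fuel j : Nat), s.length ≤ fuel + j → j ≤ s.length →
    pvWordEnd s fuel j = pvWordEndB s j := by
  intro fuel
  induction fuel with
  | zero =>
    intro j h1 h2
    have hj : j = s.length := by omega
    subst hj
    simp [pvWordEnd, pvWordEndB]
  | succ fuel ih =>
    intro j h1 h2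
    by_cases hj : j < s.length
    · have hr : List.range' j (s.length - j) = j :: List.range' (j+1) (s.length - (j+1)) := by
        rw [show s.length - j = (s.length - (j+1)) + 1 by omega]
        exact List.range'_succ ..
      rw [pvWordEnd, if_pos hj, pvHyb_eq]
      unfold pvWordEndB
      rw [hr, List.findSome?_cons]
      by_cases hC : ((s[j]? == some '-')
          && (pvLt? s (j-1)
              && (if s[j-2]? == some '-' then decide (3 ≤ j) && pvLt? s (j-3)
                  else decide (2 ≤ j) && pvLt? s (j-2)))
          && pvLt? s (j+1)
          && (pvLt? s (j+2) || ((s[j+2]? == some '-') && pvLt? s (j+3)))) = true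
      · rw [if_pos hC, show pvStopB s j = some (j+1) from by
          unfold pvStopB
          simp only [pvLetterAt_eq, pvWsAt_eq, pvPunctAt_eq, pvEmdashB_eq]
          rw [if_pos hC]]
        rfl
      · rw [if_neg hC]
        by_cases hW : ((s[j]?.map pvIsWS).getD false) = true
        · rw [if_pos hW, show pvStopB s j = some j from by
            unfold pvStopB
            simp only [pvLetterAt_eq, pvWsAt_eq, pvPunctAt_eq, pvEmdashB_eq]
            rw [if_neg hC, if_pos (by simp [hW])]]
          rfl
        · rw [if_neg hW]
          by_cases hE : (((s[j-1]?.map pvIsWP).getD false) && pvEmdashAt s j) = true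
          · rw [if_pos hE, show pvStopB s j = some j from by
              unfold pvStopB
              simp only [pvLetterAt_eq, pvWsAt_eq, pvPunctAt_eq, pvEmdashB_eq]
              rw [if_neg hC, if_pos (by simp [hW, hE])]]
            rfl
          · rw [if_neg hE, show pvStopB s j = none from by
              unfold pvStopB
              simp only [pvLetterAt_eq, pvWsAt_eq, pvPunctAt_eq, pvEmdashB_eq]
              rw [if_neg hC, if_neg (by simp [hW, hE])]]
            rw [ih (j+1) (by omega) (by omega)]
            rfl
    · have hj' : j = s.length := by omega
      subst hj'
      simp [pvWordEnd, pvWordEndB]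

theorem pvTokenize_eq (s : List Char) : ∀ (fuel i : Nat), s.length ≤ fuel + i →
    pvTokenize s fuel i = pvTokensB s i := by
  intro fuel
  induction fuel with
  | zero =>
    intro i h
    rw [pvTokenize, pvTokensB, dif_neg (by omega)]
  | succ fuel ih =>
    intro i h
    by_cases hi : i < s.length
    · have hg : s[i]? = some s[i] := List.getElem?_eq_getElem hi
      have hd : s.drop i = s[i] :: s.drop (i+1) := List.drop_eq_getElem_cons hi
      rw [pvTokenize, if_pos hi, pvTokensB, dif_pos hi]
      rw [show ((s[i]?).getD ' ') = s[i] by rw [hg]; rfl]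
      unfold pvChunkLen
      rw [hg]
      dsimp only
      simp only [pvWsB_eq, pvWsRun_eq, pvPunctAt_eq, pvEmdashB_eq, pvDashRun_eq]
      by_cases hws : pvIsWS s[i]
      · rw [if_pos hws, if_pos hws]
        have hrun : 1 ≤ ((s.drop i).takeWhile pvIsWS).length := by
          rw [hd, List.takeWhile_cons, if_pos hws]
          simp
        rw [Nat.add_sub_cancel_left]
        rw [ih (i + ((s.drop i).takeWhile pvIsWS).length) (by omega)]
      · rw [if_neg hws, if_neg hws]
        by_cases hem : ((s[i] == '-') && decide (1 ≤ i) && ((s[i-1]?.map pvIsWP).getD false)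
            && pvEmdashAt s i) = true
        · rw [if_pos hem, if_pos hem]
          have hrun : 2 ≤ pvHyRun s i := by
            simp only [Bool.and_eq_true] at hem
            have := hem.2
            unfold pvEmdashAt at this
            simp only [Bool.and_eq_true, decide_eq_true_eq] at this
            exact this.1
          rw [Nat.add_sub_cancel_left]
          rw [ih (i + pvHyRun s i) (by omega)]
        · rw [if_neg hem, if_neg hem]
          have he : pvWordEnd s (s.length + 1) (i+1) = pvWordEndB s (i+1) :=
            pvWordEnd_eq s (s.length + 1) (i+1) (by omega) (by omega)
          have hge : i + 1 ≤ pvWordEndB s (i+1) := pvWordEndB_ge s (i+1) (by omega)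
          rw [he]
          rw [show i + (pvWordEndB s (i+1) - i) = pvWordEndB s (i+1) by omega]
          rw [ih (pvWordEndB s (i+1)) (by omega)]
    · rw [pvTokenize, if_neg hi, pvTokensB, dif_neg hi]

theorem pvTakeFit_eq (w : Int) : ∀ (cs : List (List Char)) (n : Nat),
    pvTakeFit w n cs = (cs.take (pvFitLen w n cs), cs.drop (pvFitLen w n cs)) := by
  intro cs
  induction cs with
  | nil => intro n; rfl
  | cons c cs ih =>
    intro n
    rw [pvTakeFit, pvFitLen]
    split_ifs with h
    · simp [ih (n + c.length)]
    · simp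

theorem pvSumLen_eq (l : List (List Char)) : pvSumLen l = (l.map List.length).sum := by
  induction l with
  | nil => rfl
  | cons c cs ih => simp [pvSumLen, ih]

theorem pvLast_eq (l : List (List Char)) :
    (match l.getLast? with
      | some lastc => if (PySem.Chars.strip lastc).isEmpty then l.dropLast else l
      | none => l)
    = if ((l.getLast?.map (fun lastc => (PySem.Chars.strip lastc).isEmpty)).getD false)
      then l.dropLast else l := by
  rcases hl : l.getLast? with _ | a <;> simp

theorem pvFlagTrue (acc : List (List Char)) (X : List Char) :
    (!(acc ++ [X]).isEmpty) = true := by simp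

theorem pvWrap_eq (w : Int) : ∀ (fuel : Nat) (chunks acc : List (List Char)),
    pvWrapLoop w fuel chunks acc = acc ++ pvWrapB w fuel (!acc.isEmpty) chunks := by
  intro fuel
  induction fuel with
  | zero => intro chunks acc; simp [pvWrapLoop, pvWrapB]
  | succ fuel ih =>
    intro chunks acc
    match chunks with
    | [] => simp [pvWrapLoop, pvWrapB]
    | c :: cs =>
      rw [pvWrapLoop, pvWrapB]
      dsimp only
      generalize (if (PySem.Chars.strip c).isEmpty && !acc.isEmpty then cs else c :: cs) = L
      rw [pvTakeFit_eq, pvSumLen_eq, pvLast_eq]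
      simp only [pvSplitLongB_eq]
      rcases hd : List.drop (pvFitLen w 0 L) L with _ | ⟨r, rs⟩ <;>
        · rw [ih]
          split_ifs <;> first | rfl | (rw [pvFlagTrue]; simp)

theorem pvFill_eq (p : String) (w : Int) : pvFill p w = pvFillB p w := by
  unfold pvFill pvFillB
  dsimp only
  rw [pvTokenize_eq p.toList (p.toList.length + 1) 0 (by omega), pvSumLen_eq]
  rw [pvWrap_eq]
  simp

-- ---- paragraph grouping: A's fold equals B's break-index slicing ----

-- recursive paragraph grouping both sides reduce to
def pvParaRec : List String → String → List String → List (List String)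
  | cur, _, [] => [cur]
  | cur, last, y :: ys =>
    if pvBreakCond last y then cur :: pvParaRec [y] y ys else pvParaRec (cur ++ [y]) y ys

-- break positions (Nat form) of a list of lines
def pvBrN : List String → List Nat
  | x :: y :: ys => (if pvBreakCond x y then [1] else []) ++ (pvBrN (y :: ys)).map (· + 1)
  | _ => []

-- map over consecutive pairs of a list
def pvPairs {α β : Type} (g : α × α → β) : List α → List β
  | a :: b :: r => g (a, b) :: pvPairs g (b :: r)
  | _ => []

-- slice-at-breaks paragraphs (Nat form)
def pvSlN (ls : List String) : List (List String) :=
  pvPairs (fun ab => (ls.drop ab.1).take (ab.2 - ab.1)) (0 :: (pvBrN ls ++ [ls.length]))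

theorem pvBreakCondA_eq (p l : String) : pvBreakCondA p l = pvBreakCond p l := by
  by_cases h : l = ""
  · subst h
    simp [pvBreakCondA, pvBreakCond, PySem.Str.pyGet?, PySem.List.pyGet?]
  · simp [pvBreakCondA, pvBreakCond, h]

theorem pvPairs_eq_zip {α β : Type} (g : α × α → β) (l : List α) :
    pvPairs g l = (l.zip l.tail).map g := by
  induction l with
  | nil => rfl
  | cons a r ih =>
    match r with
    | [] => rfl
    | b :: r' => rw [pvPairs, ih]; rfl

theorem pvPairs_map {α β : Type} (g : α × α → β) (f : α → α) (l : List α) :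
    pvPairs g (l.map f) = pvPairs (fun ab => g (f ab.1, f ab.2)) l := by
  induction l with
  | nil => rfl
  | cons a r ih =>
    match r with
    | [] => rfl
    | b :: r' =>
      show g (f a, f b) :: pvPairs g ((b :: r').map f) = _
      rw [ih]
      rfl

theorem pvSlN_ne_nil (ls : List String) : pvSlN ls ≠ [] := by
  unfold pvSlN
  rcases h : pvBrN ls ++ [ls.length] with _ | ⟨c, t⟩
  · exact absurd h (by simp)
  · simp [pvPairs]

theorem pvStepA_concat (ps : List (List String)) (pre : List String) (last y : String) :
    pvStepA (ps, pre ++ [last]) y =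
      if pvBreakCond last y then (ps ++ [pre ++ [last]], [y]) else (ps, (pre ++ [last]) ++ [y]) := by
  have hget : PySem.List.pyGet? (pre ++ [last]) (-1) = some last := by
    simp [PySem.List.pyGet?, PySem.List.pyIdx?]
  unfold pvStepA
  simp only [hget, Option.getD_some, pvBreakCondA_eq]
  rw [if_neg (by simp)]

theorem foldA_eq (xs : List String) : ∀ (ps : List (List String)) (pre : List String) (last : String),
    (xs.foldl pvStepA (ps, pre ++ [last])).1 ++ [(xs.foldl pvStepA (ps, pre ++ [last])).2]
      = ps ++ pvParaRec (pre ++ [last]) last xs := by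
  induction xs with
  | nil => intro ps pre last; simp [pvParaRec]
  | cons y ys ih =>
    intro ps pre last
    rw [List.foldl_cons, pvStepA_concat]
    by_cases h : pvBreakCond last y
    · simp only [h, if_true]
      have := ih (ps ++ [pre ++ [last]]) [] y
      simpa [pvParaRec, h] using this
    · simp only [h]
      have := ih ps (pre ++ [last]) y
      simpa [pvParaRec, h] using this

-- the foldl state's current paragraph stays nonempty
theorem foldA_snd (xs : List String) : ∀ (ps : List (List String)) (pre : List String) (last : String),
    (xs.foldl pvStepA (ps, pre ++ [last])).2 ≠ [] := by
  induction xs with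
  | nil => intro ps pre last; simp
  | cons y ys ih =>
    intro ps pre last
    rw [List.foldl_cons, pvStepA_concat]
    by_cases h : pvBreakCond last y
    · simp only [h, if_true]
      have := ih (ps ++ [pre ++ [last]]) [] y
      simpa using this
    · simp only [h]
      have := ih ps (pre ++ [last]) y
      simpa using this

-- B's enumerate/filterMap break list is pvBrN, cast to Int and shifted by the start index
theorem breaks_eq (ls : List String) : ∀ (s : Int),
    (PySem.List.enumerate (ls.zip ls.tail) s).filterMap
      (fun ip => if pvBreakCond ip.2.1 ip.2.2 then some (ip.1 + 1) else none)
      = (pvBrN ls).map (fun (k : Nat) => s + (k : Int)) := by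
  induction ls with
  | nil => intro s; simp [pvBrN]
  | cons x xs ih =>
    intro s
    match xs with
    | [] => simp [pvBrN]
    | y :: ys =>
      have hz : (x :: y :: ys).zip (x :: y :: ys).tail
          = (x, y) :: ((y :: ys).zip ys) := rfl
      have ihy : (PySem.List.enumerate ((y :: ys).zip ys) (s + 1)).filterMap
          (fun ip => if pvBreakCond ip.2.1 ip.2.2 then some (ip.1 + 1) else none)
          = (pvBrN (y :: ys)).map (fun (k : Nat) => (s + 1) + (k : Int)) := ih (s + 1)
      have hshift : (pvBrN (y :: ys)).map (fun (k : Nat) => (s + 1) + (k : Int))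
          = ((pvBrN (y :: ys)).map (· + 1)).map (fun (k : Nat) => s + (k : Int)) := by
        rw [List.map_map]
        apply List.map_congr_left
        intro k _
        simp only [Function.comp_apply]
        push_cast
        ring
      rw [hz, PySem.List.enumerate_cons, List.filterMap_cons]
      dsimp only
      by_cases h : pvBreakCond x y
      · rw [h, if_pos rfl, ihy, hshift]
        rw [show pvBrN (x :: y :: ys) = 1 :: (pvBrN (y :: ys)).map (· + 1) by simp [pvBrN, h]]
        rw [List.map_cons]
        norm_num
      · rw [show pvBreakCond x y = false by simpa using h]
        rw [if_neg (by simp), ihy, hshift]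
        rw [show pvBrN (x :: y :: ys) = (pvBrN (y :: ys)).map (· + 1) by simp [pvBrN, h]]

-- shifting every bound by one drops the head element of the sliced list
theorem pairs_shift (x : String) (l' : List String) (t : List Nat) :
    pvPairs (fun ab => (((x :: l').drop ab.1).take (ab.2 - ab.1))) (t.map (· + 1))
      = pvPairs (fun ab => ((l'.drop ab.1).take (ab.2 - ab.1))) t := by
  rw [pvPairs_map]
  congr 1
  funext ab
  rcases ab with ⟨a, b⟩
  simp [Nat.add_sub_add_right]

theorem pvSlN_single (x : String) : pvSlN [x] = [[x]] := by
  simp [pvSlN, pvBrN, pvPairs]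

theorem pvSlN_cons_break (x y : String) (ys : List String) (h : pvBreakCond x y = true) :
    pvSlN (x :: y :: ys) = [x] :: pvSlN (y :: ys) := by
  unfold pvSlN
  simp only [List.length_cons]
  rw [show pvBrN (x :: y :: ys) = 1 :: (pvBrN (y :: ys)).map (· + 1) by simp [pvBrN, h]]
  rw [show (0 : Nat) :: ((1 : Nat) :: (pvBrN (y :: ys)).map (· + 1) ++ [ys.length + 1 + 1])
        = 0 :: 1 :: ((pvBrN (y :: ys) ++ [ys.length + 1]).map (· + 1)) by simp]
  rw [pvPairs]
  refine List.cons_eq_cons.mpr ⟨by simp, ?_⟩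
  rw [show (1 : Nat) :: (pvBrN (y :: ys) ++ [ys.length + 1]).map (· + 1)
        = (0 :: (pvBrN (y :: ys) ++ [ys.length + 1])).map (· + 1) by simp]
  exact pairs_shift x (y :: ys) (0 :: (pvBrN (y :: ys) ++ [ys.length + 1]))

theorem pvSlN_cons_nobreak (x y : String) (ys : List String) (h : pvBreakCond x y = false)
    (g : List String) (gs : List (List String)) (hg : pvSlN (y :: ys) = g :: gs) :
    pvSlN (x :: y :: ys) = (x :: g) :: gs := by
  unfold pvSlN at hg ⊢
  simp only [List.length_cons] at hg ⊢
  rw [show pvBrN (x :: y :: ys) = (pvBrN (y :: ys)).map (· + 1) by simp [pvBrN, h]]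
  rcases hb : pvBrN (y :: ys) ++ [ys.length + 1] with _ | ⟨c, t⟩
  · exact absurd hb (by simp)
  · rw [show (0 : Nat) :: ((pvBrN (y :: ys)).map (· + 1) ++ [ys.length + 1 + 1])
          = 0 :: (c + 1) :: t.map (· + 1) by
        rw [show (pvBrN (y :: ys)).map (· + 1) ++ [ys.length + 1 + 1]
              = (pvBrN (y :: ys) ++ [ys.length + 1]).map (· + 1) by simp, hb, List.map_cons]]
    rw [pvPairs]
    rw [hb, pvPairs] at hg
    rw [List.cons_eq_cons] at hg
    obtain ⟨hg1, hg2⟩ := hg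
    refine List.cons_eq_cons.mpr ⟨?_, ?_⟩
    · rw [← hg1]
      simp
    · rw [show (c + 1) :: t.map (· + 1) = ((c :: t).map (· + 1)) from by rw [List.map_cons]]
      rw [pairs_shift x (y :: ys) (c :: t), hg2]

theorem paraRec_eq_slN (xs : List String) : ∀ (last : String) (pre : List String),
    pvParaRec (pre ++ [last]) last xs
      = match pvSlN (last :: xs) with
        | g :: gs => (pre ++ g) :: gs
        | [] => [] := by
  induction xs with
  | nil =>
    intro last pre
    rw [pvSlN_single]
    simp [pvParaRec]
  | cons y ys ih =>
    intro last pre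
    rcases hg : pvSlN (y :: ys) with _ | ⟨g, gs⟩
    · exact absurd hg (pvSlN_ne_nil _)
    · by_cases h : pvBreakCond last y
      · rw [pvSlN_cons_break last y ys h]
        show pvParaRec (pre ++ [last]) last (y :: ys) = (pre ++ [last]) :: pvSlN (y :: ys)
        unfold pvParaRec
        rw [if_pos h]
        congr 1
        have := ih y []
        rw [hg] at this
        simp only [List.nil_append] at this
        rw [hg]
        simpa using this
      · rw [pvSlN_cons_nobreak last y ys (by simpa using h) g gs hg]
        have h1 := ih y (pre ++ [last])
        rw [hg] at h1
        show pvParaRec (pre ++ [last]) last (y :: ys) = (pre ++ (last :: g)) :: gs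
        unfold pvParaRec
        rw [if_neg (by simp [h])]
        rw [show pre ++ [last] ++ [y] = (pre ++ [last]) ++ [y] from rfl] at *
        rw [h1]
        simp

-- B's Int-typed bounds/zip/slice pipeline computes pvSlN
theorem portB_paras_eq (ls : List String) :
    ((((0 : Int) :: ((PySem.List.enumerate (ls.zip (PySem.List.slice ls (some 1) none)) 0).filterMap
          (fun (ip : Int × String × String) => if pvBreakCond ip.2.1 ip.2.2 then some (ip.1 + 1) else none))
          ++ [(ls.length : Int)]).zip
        (PySem.List.slice ((0 : Int) :: ((PySem.List.enumerate (ls.zip (PySem.List.slice ls (some 1) none)) 0).filterMap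
          (fun (ip : Int × String × String) => if pvBreakCond ip.2.1 ip.2.2 then some (ip.1 + 1) else none))
          ++ [(ls.length : Int)]) (some 1) none)).map
      (fun ab => PySem.List.slice ls (some ab.1) (some ab.2)))
    = pvSlN ls := by
  rw [PySem.List.slice_from_one ls]
  rw [breaks_eq ls 0]
  rw [show (pvBrN ls).map (fun (k : Nat) => (0 : Int) + (k : Int))
        = (pvBrN ls).map (fun (k : Nat) => (k : Int)) from
      List.map_congr_left (fun k _ => by ring)]
  rw [show ((0 : Int) :: (pvBrN ls).map (fun (k : Nat) => (k : Int)) ++ [(ls.length : Int)])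
        = (0 :: pvBrN ls ++ [ls.length]).map (fun (k : Nat) => (k : Int)) from by simp]
  rw [PySem.List.slice_from_one]
  rw [← List.map_tail, List.zip_map, List.map_map]
  rw [pvSlN, pvPairs_eq_zip]
  apply List.map_congr_left
  intro ab _
  rcases ab with ⟨a, b⟩
  simp only [Function.comp_apply, Prod.map]
  exact PySem.List.slice_natCast ls a b

-- A's fold (with the final flush) computes the slice-at-breaks paragraphs
theorem parasA_eq (x : String) (xs : List String) :
    (if !(((x :: xs).foldl pvStepA ([], [])).2.isEmpty)
     then ((x :: xs).foldl pvStepA ([], [])).1 ++ [((x :: xs).foldl pvStepA ([], [])).2]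
     else ((x :: xs).foldl pvStepA ([], [])).1) = pvSlN (x :: xs) := by
  have h0 : (x :: xs).foldl pvStepA (([] : List (List String)), ([] : List String))
      = xs.foldl pvStepA ([], [] ++ [x]) := by
    rw [List.foldl_cons]; rfl
  rw [h0]
  have hsnd := foldA_snd xs [] [] x
  rw [show (!(xs.foldl pvStepA (([] : List (List String)), [] ++ [x])).2.isEmpty) = true by
    simpa using hsnd]
  rw [if_pos rfl]
  rw [foldA_eq xs [] [] x]
  have hmain := paraRec_eq_slN xs x []
  rcases hg : pvSlN (x :: xs) with _ | ⟨g, gs⟩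
  · exact absurd hg (pvSlN_ne_nil _)
  · rw [hg] at hmain
    simp only [List.nil_append] at hmain ⊢
    rw [hmain]

-- ===== VERDICT (by name: the statement is the Claim_ definition above) =====
theorem reflow_text_spec : Claim_equal_reflow_text := by
  intro text width _ _
  unfold Spec_reflow_text reflow_text reflow_text_alt
  simp only [pvLinesB_eq, pvBreakCondB_eq]
  rcases hl : pvLines text with _ | ⟨x, xs⟩
  · simp
  · simp only [List.isEmpty_cons, Bool.false_eq_true, if_false]
    rw [portB_paras_eq (x :: xs), parasA_eq x xs]
    simp only [pvFill_eq]
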